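-- pv_equiv track=rewrite | github.com/hoshi114/LLaDA-RemeDi | remedi/train_remask_sft.py | _detect_fields
-- ===== SOURCE A (Python) =====
-- from typing import Optional, Tuple, Dict
--
-- def _detect_fields(sample: dict) -> Tuple[Optional[str], Optional[str], Optional[str]]:
--     """Heuristically detect field mapping from a dataset sample.
--
--     Returns (text_field, prompt_field, answer_field).
--     If (prompt_field, answer_field) are resolved, text_field is None.
--     If single-field found, (text_field, None, None) is returned.
--     """
--     keys = set(sample.keys())
--     # Try paired first
--     prompt_cands = ['prompt', 'instruction', 'question', 'input', 'query']
--     answer_cands = ['answer', 'response', 'output', 'target', 'completion', 'solution']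
--     for p in prompt_cands:
--         for a in answer_cands:
--             if p in keys and a in keys:
--                 return None, p, a
--     # Fallback single text field
--     text_cands = ['text', 'content', 'response', 'output', 'answer', 'completion', 'target', 'solution', 'body']
--     for f in text_cands:
--         if f in keys:
--             return f, None, None
--     return None, None, None
-- ===== SOURCE B (Python) =====
-- def _detect_fields(sample):
--     """Two independent linear scans instead of a nested double loop."""
--     keys = set(sample.keys())
--     prompt_cands = ['prompt', 'instruction', 'question', 'input', 'query']
--     answer_cands = ['answer', 'response', 'output', 'target', 'completion', 'solution']
--     p = next((c for c in prompt_cands if c in keys), None)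
--     a = next((c for c in answer_cands if c in keys), None)
--     if p is not None and a is not None:
--         return None, p, a
--     text_cands = ['text', 'content', 'response', 'output', 'answer', 'completion', 'target', 'solution', 'body']
--     t = next((c for c in text_cands if c in keys), None)
--     return t, None, None
-- ===== Notes on version B (the rewrite author's own statement) =====
-- stated objective: simpler
-- what changed: Replaced the nested prompt x answer double loop with two independent linear scans (first prompt candidate present, first answer candidate present) and folded the fallback loop and the final return into one find-or-None scan.
import Mathlib
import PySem

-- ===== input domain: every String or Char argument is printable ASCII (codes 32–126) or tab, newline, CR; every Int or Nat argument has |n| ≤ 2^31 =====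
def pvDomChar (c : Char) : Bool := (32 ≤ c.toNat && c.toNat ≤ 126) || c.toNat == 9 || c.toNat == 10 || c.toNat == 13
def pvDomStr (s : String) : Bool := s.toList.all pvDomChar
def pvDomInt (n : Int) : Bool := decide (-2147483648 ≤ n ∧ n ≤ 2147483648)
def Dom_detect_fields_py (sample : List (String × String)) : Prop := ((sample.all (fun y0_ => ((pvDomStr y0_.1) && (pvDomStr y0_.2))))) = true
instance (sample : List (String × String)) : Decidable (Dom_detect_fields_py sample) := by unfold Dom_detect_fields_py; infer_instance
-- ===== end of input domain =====

-- B replaces A's nested prompt×answer double loop by two independent first-match scans: simpler, same values.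

-- ===== PORT A =====
-- inner 'for a in answer_cands' loop with early return
def pvInnerA (keys : PySem.Set String) (p : String) : List String → Option (String × String)
  | [] => none
  | a :: as => if PySem.Set.contains keys p && PySem.Set.contains keys a then some (p, a)
               else pvInnerA keys p as

-- outer 'for p in prompt_cands' loop
def pvOuterA (keys : PySem.Set String) (ans : List String) : List String → Option (String × String)
  | [] => none
  | p :: ps => match pvInnerA keys p ans with
               | some r => some r
               | none => pvOuterA keys ans ps

-- fallback 'for f in text_cands' loop
def pvTextA (keys : PySem.Set String) : List String → Option String
  | [] => none
  | f :: fs => if PySem.Set.contains keys f then some f else pvTextA keys fs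

def detect_fields_py (sample : List (String × String)) : Option String × Option String × Option String :=
  let keys := PySem.Set.ofList (sample.map Prod.fst)
  match pvOuterA keys ["answer", "response", "output", "target", "completion", "solution"]
                 ["prompt", "instruction", "question", "input", "query"] with
  | some (p, a) => (none, some p, some a)
  | none =>
    match pvTextA keys ["text", "content", "response", "output", "answer", "completion", "target", "solution", "body"] with
    | some f => (some f, none, none)
    | none => (none, none, none)

-- ===== PORT B =====
def detect_fields_py_alt (sample : List (String × String)) : Option String × Option String × Option String :=
  let keys := PySem.Set.ofList (sample.map Prod.fst)
  let p := List.find? (fun c => PySem.Set.contains keys c)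
             ["prompt", "instruction", "question", "input", "query"]
  let a := List.find? (fun c => PySem.Set.contains keys c)
             ["answer", "response", "output", "target", "completion", "solution"]
  match p, a with
  | some p, some a => (none, some p, some a)
  | _, _ =>
    (List.find? (fun c => PySem.Set.contains keys c)
       ["text", "content", "response", "output", "answer", "completion", "target", "solution", "body"],
     none, none)

-- ===== PRECONDITION & SPEC =====
def Spec_detect_fields_py (sample : List (String × String)) (out : Option String × Option String × Option String) : Prop := out = detect_fields_py_alt sample
instance (sample : List (String × String)) (out : Option String × Option String × Option String) : Decidable (Spec_detect_fields_py sample out) := by unfold Spec_detect_fields_py; infer_instance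

-- ===== CLAIM (what is proved, stated in full; the proofs are below) =====
def Claim_equal_detect_fields_py : Prop := ∀ (sample : List (String × String)), Dom_detect_fields_py sample → Spec_detect_fields_py sample (detect_fields_py sample)

-- ===== LEMMAS AND PROOFS =====
theorem pvInnerA_eq (keys : PySem.Set String) (p : String) (as : List String) :
    pvInnerA keys p as =
      if PySem.Set.contains keys p then
        (List.find? (fun c => PySem.Set.contains keys c) as).map (fun a => (p, a))
      else none := by
  induction as with
  | nil => simp [pvInnerA]
  | cons a as ih =>
    simp only [pvInnerA, ih]
    by_cases hp : p ∈ keys <;> by_cases ha : a ∈ keys <;>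
      simp [hp, ha, List.find?, PySem.Set.contains]
theorem pvOuterA_eq (keys : PySem.Set String) (ans ps : List String) :
    pvOuterA keys ans ps =
      match List.find? (fun c => PySem.Set.contains keys c) ps,
            List.find? (fun c => PySem.Set.contains keys c) ans with
      | some p, some a => some (p, a)
      | _, _ => none := by
  induction ps with
  | nil => simp [pvOuterA]
  | cons p ps ih =>
    simp only [pvOuterA, pvInnerA_eq, ih]
    by_cases hp : p ∈ keys
    · simp only [PySem.Set.contains, List.find?]
      cases ha : List.find? (fun c => decide (c ∈ keys)) ans <;> simp [hp, ha]
    · simp [hp, List.find?, PySem.Set.contains]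
theorem pvTextA_eq (keys : PySem.Set String) (fs : List String) :
    pvTextA keys fs = List.find? (fun c => PySem.Set.contains keys c) fs := by
  induction fs with
  | nil => rfl
  | cons f fs ih =>
    simp only [pvTextA, ih]
    by_cases hf : f ∈ keys <;> simp [hf, List.find?, PySem.Set.contains]

-- ===== VERDICT (by name: the statement is the Claim_ definition above) =====
theorem detect_fields_py_spec : Claim_equal_detect_fields_py := by
  intro sample _
  unfold Spec_detect_fields_py detect_fields_py detect_fields_py_alt
  simp only [pvOuterA_eq, pvTextA_eq]
  set keys := PySem.Set.ofList (sample.map Prod.fst)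
  cases List.find? (fun c => PySem.Set.contains keys c)
          ["prompt", "instruction", "question", "input", "query"] <;>
    cases List.find? (fun c => PySem.Set.contains keys c)
          ["answer", "response", "output", "target", "completion", "solution"] <;>
    cases List.find? (fun c => PySem.Set.contains keys c)
          ["text", "content", "response", "output", "answer", "completion", "target", "solution", "body"] <;>
    simp
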